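-- pv_equiv track=rewrite | github.com/XixiZbz/hw_theme_crawl | encry.py | encrypt_key
-- ===== SOURCE A (Python) =====
-- def encrypt_key(data_str):
--     base64charStr = '1ORQFEHGJILKNM0ADCTS6UiWZYba3cfehg9Xlknmpo2qtsvu8wzyPBdr547Vjx+/0'
--     base64char = bytearray(base64charStr.encode('utf-8'))
--     base64char[0x40] = 0x00
--
--     v1 = list(data_str.encode('utf-8'))
--     v2 = len(v1)
--     v3 = v2
--     v4 = int(v2 / 3)
--     if v3 - 3 * v4 > 0:
--         v4 = v4 + 1
--
--     v5 = bytearray(4 * v4 | 1)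
--     v6 = 0
--     v7 = 0
--     v8 = 0
--     v9 = 0
--     v10 = 0
--     v11 = 0
--     v12 = 0
--     v13 = 0
--     v14 = 0
--     v15 = 0
--     if v3 >= 1:
--         v7 = 0
--         v6 = 0
--         while True:
--             if v7 >= v3:
--                 v9 = 0
--                 v10 = 0
--             else:
--                 v8 = 0
--                 v9 = 0
--                 while True:
--                     v9 = v1[v7 + v8] | (v9 << 8)
--                     v10 = v8 + 1
--                     if v8 > 1:
--                         break
--                     v11 = v7 + v8
--                     v8 = v8 + 1;
--                     if v11 + 1 >= v3:
--                         break
--                 v7 += v10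
--             v12 = 18
--             v13 = v9 << (24 - 8 * v10)
--             v14 = 0
--             while True:
--                 if v10 < v14:
--                     v15 = 0x40
--                 else:
--                     v15 = (v13 >> v12) & 0x3F
--                 v12 -= 6
--                 v5[v6 + v14] = base64char[v15]
--                 v14 = v14 + 1
--                 if v14 == 4:
--                     break
--             v6 += 4
--             if v7 >= v3:
--                 break
--     v5[v6] = 0x00
--     ret_str = v5.decode().strip().strip(b'\x00'.decode())
--     return ret_str
-- ===== SOURCE B (Python) =====
-- def encrypt_key(data_str):
--     # Same custom-alphabet base64 encoding, written as a simple recursion over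
--     # 3-byte chunks: no preallocated bytearray, no null padding, no stripping.
--     alpha = '1ORQFEHGJILKNM0ADCTS6UiWZYba3cfehg9Xlknmpo2qtsvu8wzyPBdr547Vjx+/'
--
--     def enc(bs):
--         if len(bs) == 0:
--             return []
--         if len(bs) == 1:
--             n = bs[0] << 16
--             return [alpha[n >> 18], alpha[(n >> 12) & 63]]
--         if len(bs) == 2:
--             n = (bs[0] << 16) | (bs[1] << 8)
--             return [alpha[n >> 18], alpha[(n >> 12) & 63], alpha[(n >> 6) & 63]]
--         n = (bs[0] << 16) | (bs[1] << 8) | bs[2]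
--         return [alpha[n >> 18], alpha[(n >> 12) & 63],
--                 alpha[(n >> 6) & 63], alpha[n & 63]] + enc(bs[3:])
--
--     return ''.join(enc(list(data_str.encode('utf-8'))))
-- ===== Notes on version B (the rewrite author's own statement) =====
-- stated objective: simpler
-- what changed: Replaces A's register-style while loops writing into a preallocated null-padded bytearray (then decoded and stripped) with a direct structural recursion over 3-byte chunks that emits exactly the output characters, so no padding bytes are ever created or stripped.
import Mathlib
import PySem

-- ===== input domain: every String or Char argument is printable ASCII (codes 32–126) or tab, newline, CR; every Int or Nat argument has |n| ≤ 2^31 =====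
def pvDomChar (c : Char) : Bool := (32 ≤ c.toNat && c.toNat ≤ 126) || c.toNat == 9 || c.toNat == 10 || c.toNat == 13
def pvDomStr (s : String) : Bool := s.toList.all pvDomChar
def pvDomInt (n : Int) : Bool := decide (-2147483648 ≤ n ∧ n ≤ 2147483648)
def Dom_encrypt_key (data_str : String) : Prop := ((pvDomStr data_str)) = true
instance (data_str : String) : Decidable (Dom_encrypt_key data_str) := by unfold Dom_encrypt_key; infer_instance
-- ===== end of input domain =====

-- B replaces A's register-style while loops writing into a preallocated null-padded
-- bytearray (decoded and stripped at the end) with a direct loop over 3-byte chunks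
-- that emits exactly the output characters; equal return values on all Dom inputs.

-- ===== PORT A =====
-- data_str.encode('utf-8'): exact on Dom (every admitted code point is < 128, one byte each)
def pvBytes (s : String) : List Nat := s.toList.map Char.toNat

-- base64char = bytearray(base64charStr); base64char[0x40] = 0x00
def aAlpha : List Nat :=
  ("1ORQFEHGJILKNM0ADCTS6UiWZYba3cfehg9Xlknmpo2qtsvu8wzyPBdr547Vjx+/0".toList.map Char.toNat).set 64 0

-- the inner byte-gathering while loop (registers v8, v9, v10, v11)
def aInner1 (v1 : List Nat) (v3 v7 v8 v9 : Nat) : Nat × Nat :=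
  let v9' := v1.getD (v7 + v8) 0 ||| (v9 <<< 8)
  let v10 := v8 + 1
  if v8 > 1 then (v9', v10)
  else if v7 + v8 + 1 ≥ v3 then (v9', v10)
  else aInner1 v1 v3 v7 (v8 + 1) v9'
termination_by 2 - v8
decreasing_by omega

-- the 4-character emitting while loop (registers v12..v15); Python's exit test
-- 'v14 + 1 == 4' is written 'v14 + 1 < 4' for the recursive case — identical for
-- every reachable v14 (0..3), a totality guard only
def aInner2 (v5 : List Nat) (v6 v12 v13 v10 v14 : Nat) : List Nat :=
  let v15 := if v10 < v14 then 0x40 else (v13 >>> v12) &&& 0x3F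
  let v5' := v5.set (v6 + v14) (aAlpha.getD v15 0)
  if v14 + 1 < 4 then aInner2 v5' v6 (v12 - 6) v13 v10 (v14 + 1) else v5'
termination_by 4 - v14
decreasing_by omega

-- the loop body's first result component is v8 + 1 ≥ 1 (needed for aOuter's termination)
theorem aInner1_snd_pos (v1 : List Nat) (v3 v7 v8 v9 : Nat) : 1 ≤ (aInner1 v1 v3 v7 v8 v9).2 := by
  fun_induction aInner1 <;> simp_all <;> omega

-- the outer while loop (registers v6, v7; one iteration = gather ≤3 bytes, emit 4 bytes)
def aOuter (v1 : List Nat) (v3 v7 v6 : Nat) (v5 : List Nat) : List Nat × Nat :=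
  if hv : v7 ≥ v3 then
    (aInner2 v5 v6 18 (0 <<< (24 - 8 * 0)) 0 0, v6 + 4)
  else
    let p := aInner1 v1 v3 v7 0 0
    let v5' := aInner2 v5 v6 18 (p.1 <<< (24 - 8 * p.2)) p.2 0
    if v7 + p.2 ≥ v3 then (v5', v6 + 4)
    else aOuter v1 v3 (v7 + p.2) (v6 + 4) v5'
termination_by v3 - v7
decreasing_by have := aInner1_snd_pos v1 v3 v7 0 0; omega

-- int(v2/3) is ported as Nat division (exact: float rounding differs only beyond 2^52)
def encrypt_key (data_str : String) : String :=
  let v1 := pvBytes data_str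
  let v3 := v1.length
  let v4 := v3 / 3
  let v4 := if v3 - 3 * v4 > 0 then v4 + 1 else v4
  let v5 := List.replicate (4 * v4 ||| 1) 0
  let r := if 1 ≤ v3 then aOuter v1 v3 0 0 v5 else (v5, 0)
  let v5 := (r.1).set r.2 0
  -- v5.decode(): exact here, every stored byte is ASCII (alphabet byte or 0)
  PySem.Str.stripChars (PySem.Str.strip (String.ofList (v5.map Char.ofNat))) "\x00"

-- ===== PORT B =====
def bAlpha : List Char := "1ORQFEHGJILKNM0ADCTS6UiWZYba3cfehg9Xlknmpo2qtsvu8wzyPBdr547Vjx+/".toList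

-- alpha[n]; every use has n < 64, so the default is never taken
def bChar (n : Nat) : Char := bAlpha.getD n ' '

-- for i in range(0, k, 3): four characters per full 3-byte chunk
def bLoop (bs : List Nat) (k i : Nat) (out : List Char) : List Char :=
  if i < k then
    let n := (bs.getD i 0 <<< 16) ||| (bs.getD (i + 1) 0 <<< 8) ||| bs.getD (i + 2) 0
    bLoop bs k (i + 3)
      (out ++ [bChar (n >>> 18), bChar ((n >>> 12) &&& 63), bChar ((n >>> 6) &&& 63), bChar (n &&& 63)])
  else out
termination_by k - i
decreasing_by omega

def encrypt_key_alt (data_str : String) : String :=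
  let bs := pvBytes data_str
  let r := bs.length % 3
  let k := bs.length - r
  let out := bLoop bs k 0 []
  let out :=
    if r = 1 then
      let n := bs.getD k 0 <<< 16
      out ++ [bChar (n >>> 18), bChar ((n >>> 12) &&& 63)]
    else if r = 2 then
      let n := (bs.getD k 0 <<< 16) ||| (bs.getD (k + 1) 0 <<< 8)
      out ++ [bChar (n >>> 18), bChar ((n >>> 12) &&& 63), bChar ((n >>> 6) &&& 63)]
    else out
  String.ofList out

-- ===== PRECONDITION & SPEC =====
def Spec_encrypt_key (data_str : String) (out : String) : Prop := out = encrypt_key_alt data_str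
instance (data_str : String) (out : String) : Decidable (Spec_encrypt_key data_str out) := by unfold Spec_encrypt_key; infer_instance

-- ===== CLAIM (what is proved, stated in full; the proofs are below) =====
def Claim_equal_encrypt_key : Prop := ∀ (data_str : String), Dom_encrypt_key data_str → Spec_encrypt_key data_str (encrypt_key data_str)

-- ===== LEMMAS AND PROOFS =====

-- canonical chunk encoding both ports are reduced to
def E : List Nat → List Char
  | [] => []
  | [a] =>
    let n := a <<< 16
    [bChar (n >>> 18), bChar ((n >>> 12) &&& 63)]
  | [a, b] =>
    let n := (a <<< 16) ||| (b <<< 8)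
    [bChar (n >>> 18), bChar ((n >>> 12) &&& 63), bChar ((n >>> 6) &&& 63)]
  | a :: b :: c :: r =>
    let n := (a <<< 16) ||| (b <<< 8) ||| c
    bChar (n >>> 18) :: bChar ((n >>> 12) &&& 63) :: bChar ((n >>> 6) &&& 63) :: bChar (n &&& 63) :: E r

-- number of padding null bytes A appends after the E-characters
def padE : List Nat → Nat
  | [] => 0
  | [_] => 2
  | [_, _] => 1
  | _ :: _ :: _ :: r => padE r

theorem bLoop_E (bs : List Nat) (k : Nat) (hk : k ≤ bs.length) :
    ∀ (m i : Nat) (out : List Char), k - i = 3 * m → i ≤ k →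
      bLoop bs k i out ++ E (bs.drop k) = out ++ E (bs.drop i) := by
  intro m
  induction m with
  | zero =>
    intro i out h0 hi
    have : i = k := by omega
    subst this
    rw [bLoop]
    simp
  | succ m ih =>
    intro i out h0 hi
    have hik : i < k := by omega
    have h2 : i + 2 < bs.length := by omega
    rw [bLoop]
    simp only [hik, if_pos]
    rw [ih (i + 3) _ (by omega) (by omega)]
    have e0 : bs.drop i = bs[i] :: bs.drop (i + 1) := List.drop_eq_getElem_cons (by omega)
    have e1 : bs.drop (i + 1) = bs[i + 1] :: bs.drop (i + 2) := List.drop_eq_getElem_cons (by omega)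
    have e2 : bs.drop (i + 2) = bs[i + 2] :: bs.drop (i + 3) := List.drop_eq_getElem_cons (by omega)
    rw [e0, e1, e2, E]
    simp [List.getD_eq_getElem?_getD, List.getElem?_eq_getElem, h2, show i < bs.length by omega,
      show i + 1 < bs.length by omega]

theorem alt_eq_E (s : String) : encrypt_key_alt s = String.ofList (E (pvBytes s)) := by
  simp only [encrypt_key_alt]
  set bs := pvBytes s with hbs
  have hk : bs.length - bs.length % 3 ≤ bs.length := by omega
  have hmain := bLoop_E bs (bs.length - bs.length % 3) hk ((bs.length - bs.length % 3) / 3) 0 []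
    (by omega) (by omega)
  simp only [List.drop_zero, List.nil_append] at hmain
  set k := bs.length - bs.length % 3 with hkdef
  have htail : (if bs.length % 3 = 1 then
        bLoop bs k 0 [] ++ [bChar ((bs.getD k 0 <<< 16) >>> 18), bChar (((bs.getD k 0 <<< 16) >>> 12) &&& 63)]
      else if bs.length % 3 = 2 then
        bLoop bs k 0 [] ++ [bChar ((((bs.getD k 0 <<< 16) ||| (bs.getD (k + 1) 0 <<< 8))) >>> 18),
          bChar ((((bs.getD k 0 <<< 16) ||| (bs.getD (k + 1) 0 <<< 8))) >>> 12 &&& 63),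
          bChar ((((bs.getD k 0 <<< 16) ||| (bs.getD (k + 1) 0 <<< 8))) >>> 6 &&& 63)]
      else bLoop bs k 0 []) = bLoop bs k 0 [] ++ E (bs.drop k) := by
    rcases hr : bs.length % 3 with _ | _ | _ | j
    · have : bs.drop k = [] := by
        apply List.drop_eq_nil_of_le; omega
      simp [this, E]
    · have h1 : k < bs.length := by omega
      have e0 : bs.drop k = bs[k] :: bs.drop (k + 1) := List.drop_eq_getElem_cons h1
      have e1 : bs.drop (k + 1) = [] := by
        apply List.drop_eq_nil_of_le; omega
      rw [e0, e1, E]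
      simp [List.getD_eq_getElem?_getD, List.getElem?_eq_getElem, h1]
    · have h1 : k + 1 < bs.length := by omega
      have e0 : bs.drop k = bs[k] :: bs.drop (k + 1) := List.drop_eq_getElem_cons (by omega)
      have e1 : bs.drop (k + 1) = bs[k + 1] :: bs.drop (k + 2) := List.drop_eq_getElem_cons h1
      have e2 : bs.drop (k + 2) = [] := by
        apply List.drop_eq_nil_of_le; omega
      rw [e0, e1, e2, E]
      simp [List.getD_eq_getElem?_getD, List.getElem?_eq_getElem, h1, show k < bs.length by omega]
    · omega
  rw [htail, hmain]

-- ---- small arithmetic and alphabet facts ----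

theorem and63_lt (x : Nat) : x &&& 63 < 64 := by
  have := Nat.and_le_right (n := x) (m := 63); omega

theorem and63_eq_self {x : Nat} (h : x < 64) : x &&& 63 = x := by
  have := Nat.and_two_pow_sub_one_eq_mod x 6
  norm_num at this
  omega

theorem shl16_lt {a : Nat} (h : a < 256) : a <<< 16 < 2 ^ 24 := by
  rw [Nat.shiftLeft_eq]; norm_num; omega

theorem shl8_lt {a : Nat} (h : a < 256) : a <<< 8 < 2 ^ 24 := by
  rw [Nat.shiftLeft_eq]; norm_num; omega

theorem lt_pow24 {a : Nat} (h : a < 256) : a < 2 ^ 24 := by norm_num; omega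

theorem shr18_lt {n : Nat} (h : n < 2 ^ 24) : n >>> 18 < 64 := by
  rw [Nat.shiftRight_eq_div_pow]; norm_num at h ⊢; omega

set_option maxRecDepth 4000 in
theorem aAlpha_getD_lt : ∀ v < 64, aAlpha.getD v 0 = (bChar v).toNat := by decide

set_option maxRecDepth 4000 in
theorem aAlpha_getD_64 : aAlpha.getD 64 0 = 0 := by decide

set_option maxRecDepth 4000 in
theorem bAlpha_len : bAlpha.length = 64 := by decide

theorem bChar_mem {n : Nat} (h : n < 64) : bChar n ∈ bAlpha := by
  have hl : n < bAlpha.length := by rw [bAlpha_len]; exact h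
  rw [bChar, List.getD_eq_getElem?_getD, List.getElem?_eq_getElem hl]
  simp [List.getElem_mem]

set_option maxRecDepth 4000 in
theorem bAlpha_char_facts_idx : ∀ v < 64,
    PySem.Chars.isspace (bChar v) = false ∧ ((bChar v) == Char.ofNat 0) = false ∧ (bChar v).toNat < 128 := by
  decide

theorem bAlpha_char_facts : ∀ c ∈ bAlpha,
    PySem.Chars.isspace c = false ∧ (c == Char.ofNat 0) = false ∧ c.toNat < 128 := by
  intro c hc
  obtain ⟨i, hi, heq⟩ := List.mem_iff_getElem.mp hc
  have hi64 : i < 64 := by rw [bAlpha_len] at hi; exact hi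
  have hbc : bChar i = c := by
    rw [bChar, List.getD_eq_getElem?_getD, List.getElem?_eq_getElem hi]
    simpa using heq
  rw [← hbc]
  exact bAlpha_char_facts_idx i hi64

-- ---- shape of the two bit-packings agree ----

theorem shlshl (a : Nat) : (a <<< 8) <<< 8 = a <<< 16 := by
  simp [Nat.shiftLeft_eq, pow_succ]; ring

theorem pack2_eq (a b : Nat) : (b ||| (a <<< 8)) <<< 8 = (a <<< 16) ||| (b <<< 8) := by
  rw [Nat.shiftLeft_or_distrib, shlshl, Nat.lor_comm]

theorem pack3_eq (a b c : Nat) : c ||| ((b ||| (a <<< 8)) <<< 8) = (a <<< 16) ||| (b <<< 8) ||| c := by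
  rw [pack2_eq, Nat.lor_comm]

-- ---- characterisation of the inner gather loop ----

theorem getq (v1 : List Nat) (v7 j : Nat) : v1[v7 + j]? = (v1.drop v7)[j]? :=
  List.getElem?_drop.symm

theorem aInner1_one {v1 : List Nat} {v7 a : Nat} (h : v1.drop v7 = [a]) :
    aInner1 v1 v1.length v7 0 0 = (a, 1) := by
  have h7 : v7 ≤ v1.length := by
    by_contra hc
    rw [List.drop_eq_nil_of_le (by omega)] at h; simp at h
  have hlen : v1.length = v7 + 1 := by
    have := congrArg List.length h; simp at this; omega
  have hq0 : v1[v7]? = some a := by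
    have t := getq v1 v7 0
    rw [h] at t; simpa using t
  have hlt0 : v7 < v1.length := by omega
  have he0 : v1[v7] = a := by
    have t := List.getElem?_eq_getElem hlt0
    rw [hq0] at t; exact (Option.some.inj t).symm
  rw [aInner1]
  simp [hq0, he0, hlen]

theorem aInner1_two {v1 : List Nat} {v7 a b : Nat} (h : v1.drop v7 = [a, b]) :
    aInner1 v1 v1.length v7 0 0 = (b ||| (a <<< 8), 2) := by
  have h7 : v7 ≤ v1.length := by
    by_contra hc
    rw [List.drop_eq_nil_of_le (by omega)] at h; simp at h
  have hlen : v1.length = v7 + 2 := by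
    have := congrArg List.length h; simp at this; omega
  have hq0 : v1[v7]? = some a := by
    have t := getq v1 v7 0
    rw [h] at t; simpa using t
  have hq1 : v1[v7 + 1]? = some b := by
    have t := getq v1 v7 1
    rw [h] at t; simpa using t
  have hlt0 : v7 < v1.length := by omega
  have hlt1 : v7 + 1 < v1.length := by omega
  have he0 : v1[v7] = a := by
    have t := List.getElem?_eq_getElem hlt0
    rw [hq0] at t; exact (Option.some.inj t).symm
  have he1 : v1[v7 + 1] = b := by
    have t := List.getElem?_eq_getElem hlt1
    rw [hq1] at t; exact (Option.some.inj t).symm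
  rw [aInner1]
  simp [hq0, he0, hlen]
  rw [aInner1]
  simp [hq0, hq1, he0, he1, hlen]
  all_goals (split_ifs <;> first | rfl | omega)

theorem aInner1_three {v1 : List Nat} {v7 a b c : Nat} {r : List Nat} (h : v1.drop v7 = a :: b :: c :: r) :
    aInner1 v1 v1.length v7 0 0 = (c ||| ((b ||| (a <<< 8)) <<< 8), 3) := by
  have h7 : v7 ≤ v1.length := by
    by_contra hc
    rw [List.drop_eq_nil_of_le (by omega)] at h; simp at h
  have hlen : v1.length = v7 + 3 + r.length := by
    have := congrArg List.length h; simp at this; omega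
  have hq0 : v1[v7]? = some a := by
    have t := getq v1 v7 0
    rw [h] at t; simpa using t
  have hq1 : v1[v7 + 1]? = some b := by
    have t := getq v1 v7 1
    rw [h] at t; simpa using t
  have hq2 : v1[v7 + 2]? = some c := by
    have t := getq v1 v7 2
    rw [h] at t; simpa using t
  have hlt0 : v7 < v1.length := by omega
  have hlt1 : v7 + 1 < v1.length := by omega
  have hlt2 : v7 + 2 < v1.length := by omega
  have he0 : v1[v7] = a := by
    have t := List.getElem?_eq_getElem hlt0
    rw [hq0] at t; exact (Option.some.inj t).symm
  have he1 : v1[v7 + 1] = b := by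
    have t := List.getElem?_eq_getElem hlt1
    rw [hq1] at t; exact (Option.some.inj t).symm
  have he2 : v1[v7 + 2] = c := by
    have t := List.getElem?_eq_getElem hlt2
    rw [hq2] at t; exact (Option.some.inj t).symm
  rw [aInner1]
  simp [hq0, he0, hlen]
  all_goals try (rw [aInner1]; simp [hq1, he1, hlen])
  all_goals try (rw [aInner1]; simp [hq0, hq1, hq2, he0, he1, he2, hlen])
  all_goals (split_ifs <;> first | rfl | omega)

-- ---- the 4-byte emit loop writes four bytes after the prefix ----

theorem set_after (pre l : List Nat) (j x : Nat) :
    (pre ++ l).set (pre.length + j) x = pre ++ l.set j x := by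
  simp [List.set_append]

theorem aInner2_fill (pre : List Nat) (z0 z1 z2 z3 : Nat) (zr : List Nat) (v13 v10 : Nat) :
    aInner2 (pre ++ z0 :: z1 :: z2 :: z3 :: zr) pre.length 18 v13 v10 0 =
      pre ++ aAlpha.getD (if v10 < 0 then 0x40 else (v13 >>> 18) &&& 0x3F) 0
          :: aAlpha.getD (if v10 < 1 then 0x40 else (v13 >>> 12) &&& 0x3F) 0
          :: aAlpha.getD (if v10 < 2 then 0x40 else (v13 >>> 6) &&& 0x3F) 0
          :: aAlpha.getD (if v10 < 3 then 0x40 else (v13 >>> 0) &&& 0x3F) 0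
          :: zr := by
  have set_at_len : ∀ (l : List Nat) (x : Nat),
      (pre ++ l).set pre.length x = pre ++ l.set 0 x := by
    intro l x
    simpa using set_after pre l 0 x
  rw [aInner2]
  simp only [Nat.add_zero, set_at_len]
  norm_num
  rw [aInner2]
  simp only [set_after]
  norm_num
  rw [aInner2]
  simp only [set_after]
  norm_num
  rw [aInner2]
  simp only [set_after]
  norm_num

-- ---- the byte block A writes, per chunk ----

def WB (u : List Nat) : List Nat := (E u).map Char.toNat ++ List.replicate (padE u) 0

theorem WB_nil : WB [] = [] := by simp [WB, E, padE]

theorem WB_one (a : Nat) : WB [a] =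
    [(bChar ((a <<< 16) >>> 18)).toNat, (bChar (((a <<< 16) >>> 12) &&& 63)).toNat, 0, 0] := by
  simp [WB, E, padE, List.replicate]

theorem WB_two (a b : Nat) : WB [a, b] =
    [(bChar (((a <<< 16) ||| (b <<< 8)) >>> 18)).toNat,
     (bChar ((((a <<< 16) ||| (b <<< 8)) >>> 12) &&& 63)).toNat,
     (bChar ((((a <<< 16) ||| (b <<< 8)) >>> 6) &&& 63)).toNat, 0] := by
  simp [WB, E, padE, List.replicate]

theorem WB_cons (a b c : Nat) (r : List Nat) : WB (a :: b :: c :: r) =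
    (bChar (((a <<< 16) ||| (b <<< 8) ||| c) >>> 18)).toNat
      :: (bChar ((((a <<< 16) ||| (b <<< 8) ||| c) >>> 12) &&& 63)).toNat
      :: (bChar ((((a <<< 16) ||| (b <<< 8) ||| c) >>> 6) &&& 63)).toNat
      :: (bChar (((a <<< 16) ||| (b <<< 8) ||| c) &&& 63)).toNat
      :: WB r := by
  simp [WB, E, padE]

theorem E_mem : ∀ (u : List Nat), (∀ b ∈ u, b < 256) → ∀ c ∈ E u, c ∈ bAlpha := by
  intro u
  induction u using E.induct with
  | case1 =>
    intro _ c hc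
    simp [E] at hc
  | case2 a =>
    intro hb c hc
    have ha : a < 256 := hb a (by simp)
    have hn : a <<< 16 < 2 ^ 24 := shl16_lt ha
    simp only [E, List.mem_cons, List.mem_singleton] at hc
    rcases hc with rfl | rfl | hc
    · exact bChar_mem (shr18_lt hn)
    · exact bChar_mem (and63_lt _)
    · simp at hc
  | case3 a b =>
    intro hb c hc
    have hn : (a <<< 16) ||| (b <<< 8) < 2 ^ 24 :=
      Nat.or_lt_two_pow (shl16_lt (hb a (by simp))) (shl8_lt (hb b (by simp)))
    simp only [E, List.mem_cons, List.mem_singleton] at hc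
    rcases hc with rfl | rfl | rfl | hc
    · exact bChar_mem (shr18_lt hn)
    · exact bChar_mem (and63_lt _)
    · exact bChar_mem (and63_lt _)
    · simp at hc
  | case4 a b c r ih =>
    intro hb x hx
    have hn : (a <<< 16) ||| (b <<< 8) ||| c < 2 ^ 24 :=
      Nat.or_lt_two_pow
        (Nat.or_lt_two_pow (shl16_lt (hb a (by simp))) (shl8_lt (hb b (by simp))))
        (lt_pow24 (hb c (by simp)))
    simp only [E, List.mem_cons] at hx
    rcases hx with rfl | rfl | rfl | rfl | hx
    · exact bChar_mem (shr18_lt hn)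
    · exact bChar_mem (and63_lt _)
    · exact bChar_mem (and63_lt _)
    · exact bChar_mem (and63_lt _)
    · exact ih (fun y hy => hb y (by simp [hy])) x hx

-- translation of one written byte: real character
theorem byte_real {idx : Nat} (h : idx < 64) : aAlpha.getD idx 0 = (bChar idx).toNat :=
  aAlpha_getD_lt idx h

theorem aOuter_spec : ∀ (u v1 : List Nat), (∀ b ∈ u, b < 256) → ∀ (v7 : Nat) (pre z : List Nat),
    v1.drop v7 = u → v7 < v1.length → (WB u).length ≤ z.length →
    aOuter v1 v1.length v7 pre.length (pre ++ z) =
      (pre ++ WB u ++ z.drop (WB u).length, pre.length + (WB u).length) := by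
  intro u
  induction u using E.induct with
  | case1 =>
    intro v1 _ v7 pre z h hlt _
    have := congrArg List.length h
    simp at this
    omega
  | case2 a =>
    intro v1 hb v7 pre z h hlt hz
    have ha : a < 256 := hb a (by simp)
    have hn : a <<< 16 < 2 ^ 24 := shl16_lt ha
    have hlen : v1.length = v7 + 1 := by
      have := congrArg List.length h; simp at this; omega
    have hz4 : 4 ≤ z.length := by rw [WB_one] at hz; simpa using hz
    rcases z with _ | ⟨z0, _ | ⟨z1, _ | ⟨z2, _ | ⟨z3, zr⟩⟩⟩⟩ <;> simp at hz4
    rw [aOuter]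
    rw [dif_neg (by omega)]
    rw [aInner1_one h]
    simp only []
    norm_num
    rw [aInner2_fill]
    rw [if_neg (show ¬((1:Nat) < 0) by norm_num), if_neg (show ¬((1:Nat) < 1) by norm_num),
      if_pos (show (1:Nat) < 2 by norm_num), if_pos (show (1:Nat) < 3 by norm_num)]
    rw [aAlpha_getD_64]
    rw [if_pos (show v7 + 1 ≥ v1.length by omega)]
    rw [and63_eq_self (shr18_lt hn), byte_real (shr18_lt hn), byte_real (and63_lt _)]
    rw [WB_one]
    simp
  | case3 a b =>
    intro v1 hb v7 pre z h hlt hz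
    have hn : (a <<< 16) ||| (b <<< 8) < 2 ^ 24 :=
      Nat.or_lt_two_pow (shl16_lt (hb a (by simp))) (shl8_lt (hb b (by simp)))
    have hlen : v1.length = v7 + 2 := by
      have := congrArg List.length h; simp at this; omega
    have hz4 : 4 ≤ z.length := by rw [WB_two] at hz; simpa using hz
    rcases z with _ | ⟨z0, _ | ⟨z1, _ | ⟨z2, _ | ⟨z3, zr⟩⟩⟩⟩ <;> simp at hz4
    rw [aOuter]
    rw [dif_neg (by omega)]
    rw [aInner1_two h]
    simp only []
    norm_num
    rw [aInner2_fill]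
    rw [if_neg (show ¬((2:Nat) < 0) by norm_num), if_neg (show ¬((2:Nat) < 1) by norm_num),
      if_neg (show ¬((2:Nat) < 2) by norm_num), if_pos (show (2:Nat) < 3 by norm_num)]
    rw [aAlpha_getD_64]
    rw [if_pos (show v7 + 2 ≥ v1.length by omega)]
    rw [pack2_eq]
    rw [and63_eq_self (shr18_lt hn), byte_real (shr18_lt hn), byte_real (and63_lt _),
      byte_real (and63_lt _)]
    rw [WB_two]
    simp
  | case4 a b c r ih =>
    intro v1 hb v7 pre z h hlt hz
    have hn : (a <<< 16) ||| (b <<< 8) ||| c < 2 ^ 24 :=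
      Nat.or_lt_two_pow
        (Nat.or_lt_two_pow (shl16_lt (hb a (by simp))) (shl8_lt (hb b (by simp))))
        (lt_pow24 (hb c (by simp)))
    have hlen : v1.length = v7 + 3 + r.length := by
      have := congrArg List.length h; simp at this; omega
    have hz4 : 4 ≤ z.length := by
      rw [WB_cons] at hz; simp at hz; omega
    rcases z with _ | ⟨z0, _ | ⟨z1, _ | ⟨z2, _ | ⟨z3, zr⟩⟩⟩⟩ <;> simp at hz4
    rw [aOuter]
    rw [dif_neg (by omega)]
    rw [aInner1_three h]
    simp only []
    norm_num
    rw [aInner2_fill]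
    rw [if_neg (show ¬((3:Nat) < 0) by norm_num), if_neg (show ¬((3:Nat) < 1) by norm_num),
      if_neg (show ¬((3:Nat) < 2) by norm_num), if_neg (show ¬((3:Nat) < 3) by norm_num)]
    rw [pack3_eq, Nat.shiftRight_zero]
    rw [and63_eq_self (shr18_lt hn), byte_real (shr18_lt hn), byte_real (and63_lt _),
      byte_real (and63_lt _), byte_real (and63_lt _)]
    rcases r with _ | ⟨r0, rs⟩
    · rw [if_pos (show v7 + 3 ≥ v1.length by simp at hlen; omega)]
      rw [WB_cons, WB_nil]
      simp
    · rw [if_neg (show ¬(v7 + 3 ≥ v1.length) by simp at hlen; omega)]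
      have hdrop : v1.drop (v7 + 3) = r0 :: rs := by
        rw [← List.drop_drop, h]
        rfl
      have hlt3 : v7 + 3 < v1.length := by simp at hlen; omega
      have hzr : (WB (r0 :: rs)).length ≤ zr.length := by
        rw [WB_cons] at hz
        simp at hz ⊢
        omega
      have hrec := ih v1 (fun y hy => hb y (by simp at hy ⊢; tauto)) (v7 + 3)
        (pre ++ [(bChar (((a <<< 16) ||| (b <<< 8) ||| c) >>> 18)).toNat,
                 (bChar ((((a <<< 16) ||| (b <<< 8) ||| c) >>> 12) &&& 63)).toNat,
                 (bChar ((((a <<< 16) ||| (b <<< 8) ||| c) >>> 6) &&& 63)).toNat,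
                 (bChar (((a <<< 16) ||| (b <<< 8) ||| c) &&& 63)).toNat]) zr
        hdrop hlt3 hzr
      simp only [List.length_append, List.length_cons, List.length_nil] at hrec
      rw [show pre.length + 4 = pre.length + (0 + 1 + 1 + 1 + 1) from by omega] at *
      rw [List.append_assoc] at hrec
      simp only [List.cons_append, List.nil_append] at hrec
      rw [hrec, WB_cons]
      refine Prod.ext ?_ ?_ <;> simp [List.append_assoc]
      omega

theorem WB_len : ∀ u : List Nat, (WB u).length = 4 * ((u.length + 2) / 3) := by
  intro u
  induction u using E.induct with
  | case1 => simp [WB, E, padE]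
  | case2 a => rw [WB_one]; simp
  | case3 a b => rw [WB_two]; simp
  | case4 a b c r ih =>
    rw [WB_cons]
    simp only [List.length_cons, ih, List.length_cons]
    omega

theorem or_one (k : Nat) : 4 * k ||| 1 = 4 * k + 1 := by
  apply Nat.eq_of_testBit_eq
  intro i
  cases i with
  | zero => simp [Nat.testBit_zero]; omega
  | succ j =>
    rw [Nat.testBit_or, Nat.testBit_succ, Nat.testBit_succ, Nat.testBit_succ]
    have h1 : 4 * k / 2 = 2 * k := by omega
    have h2 : (4 * k + 1) / 2 = 2 * k := by omega
    have h3 : (1 : Nat) / 2 = 0 := by omega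
    rw [h1, h2, h3]
    simp

theorem dropWhile_all_false {α : Type} (p : α → Bool) (l : List α) (h : ∀ c ∈ l, p c = false) :
    l.dropWhile p = l := by
  cases l with
  | nil => rfl
  | cons x t => simp [List.dropWhile_cons, h x (by simp)]

theorem dropWhile_replicate_append {α : Type} (p : α → Bool) (x : α) (hp : p x = true)
    (m : Nat) (w : List α) : ((List.replicate m x) ++ w).dropWhile p = w.dropWhile p := by
  induction m with
  | zero => simp
  | succ k ih => simp [List.replicate_succ, List.dropWhile_cons, hp, ih]

theorem null_toList : ("\x00" : String).toList = [Char.ofNat 0] := by decide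

theorem strip_null_pad (l : List Char) (m : Nat)
    (hl : ∀ c ∈ l, PySem.Chars.isspace c = false ∧ (c == Char.ofNat 0) = false) :
    PySem.Str.stripChars (PySem.Str.strip (String.ofList (l ++ List.replicate m (Char.ofNat 0)))) "\x00"
      = String.ofList l := by
  have hnosp : ∀ c ∈ l ++ List.replicate m (Char.ofNat 0), PySem.Chars.isspace c = false := by
    intro c hc
    rcases List.mem_append.mp hc with h1 | h2
    · exact (hl c h1).1
    · rw [List.eq_of_mem_replicate h2]; decide
  have hpc : ∀ c, ([Char.ofNat 0].contains c) = (c == Char.ofNat 0) := by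
    intro c
    by_cases h : c = Char.ofNat 0 <;> simp [List.contains_cons, h]
  have key : PySem.Chars.stripChars (PySem.Chars.strip (l ++ List.replicate m (Char.ofNat 0)))
      [Char.ofNat 0] = l := by
    rw [PySem.Chars.strip, PySem.Chars.lstrip, PySem.Chars.rstrip]
    rw [dropWhile_all_false _ _ hnosp]
    rw [dropWhile_all_false _ _ (fun c hc => hnosp c (List.mem_reverse.mp hc))]
    rw [List.reverse_reverse]
    rw [PySem.Chars.stripChars]
    cases l with
    | nil =>
      simp only [List.nil_append]
      rw [show List.replicate m (Char.ofNat 0) = List.replicate m (Char.ofNat 0) ++ [] by simp]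
      rw [dropWhile_replicate_append _ _ (by simp [hpc]) m []]
      simp
    | cons x t =>
      rw [List.cons_append]
      rw [List.dropWhile_cons_of_neg (by
        simp only [hpc]
        exact ne_true_of_eq_false (hl x (by simp)).2)]
      rw [← List.cons_append]
      rw [List.reverse_append, List.reverse_replicate]
      rw [dropWhile_replicate_append _ _ (by simp [hpc])]
      rw [dropWhile_all_false _ _ (by
        intro c hc
        have hcm : c ∈ x :: t := by
          have := List.mem_reverse.mp hc
          exact this
        simp only [hpc]
        exact (hl c hcm).2)]
      simp
  have h1 : (PySem.Str.stripChars (PySem.Str.strip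
      (String.ofList (l ++ List.replicate m (Char.ofNat 0)))) "\x00").toList = l := by
    rw [PySem.Str.toList_stripChars, PySem.Str.toList_strip, null_toList]
    rw [String.toList_ofList]
    exact key
  have := congrArg String.ofList h1
  rwa [String.ofList_toList] at this

theorem A_eq_E (s : String) (hb : ∀ b ∈ pvBytes s, b < 256) :
    encrypt_key s = String.ofList (E (pvBytes s)) := by
  simp only [encrypt_key]
  set v1 := pvBytes s with hv1
  have hEchar : ∀ c ∈ E v1, PySem.Chars.isspace c = false ∧ (c == Char.ofNat 0) = false := by
    intro c hc
    have := bAlpha_char_facts c (E_mem v1 hb c hc)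
    exact ⟨this.1, this.2.1⟩
  by_cases hpos : 1 ≤ v1.length
  · rw [if_pos hpos]
    have hv4 : (if v1.length - 3 * (v1.length / 3) > 0 then v1.length / 3 + 1 else v1.length / 3)
        = (v1.length + 2) / 3 := by split <;> omega
    rw [hv4, or_one]
    have hL : (WB v1).length = 4 * ((v1.length + 2) / 3) := WB_len v1
    have hspec := aOuter_spec v1 v1 hb 0 []
      (List.replicate (4 * ((v1.length + 2) / 3) + 1) 0)
      List.drop_zero (by omega) (by simp [hL])
    simp only [List.length_nil, List.nil_append] at hspec
    rw [hspec]
    simp only [List.nil_append, Nat.zero_add]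
    rw [List.drop_replicate]
    rw [show 4 * ((v1.length + 2) / 3) + 1 - (WB v1).length = 1 by omega]
    rw [show (List.replicate 1 (0 : Nat)) = [0] from rfl]
    rw [show (WB v1).length = (WB v1).length + 0 from by omega, set_after]
    rw [show ([0] : List Nat).set 0 0 = [0] from rfl]
    rw [WB]
    rw [List.append_assoc, List.map_append, List.map_append]
    rw [List.map_map]
    rw [List.map_congr_left (fun c hc => (by simp [Char.ofNat_toNat] :
      (Char.ofNat ∘ Char.toNat) c = id c))]
    rw [List.map_id]
    rw [List.map_replicate]
    rw [show (List.map Char.ofNat [0]) = [Char.ofNat 0] from rfl]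
    rw [show List.replicate (padE v1) (Char.ofNat 0) ++ [Char.ofNat 0]
        = List.replicate (padE v1 + 1) (Char.ofNat 0) from by
      rw [List.replicate_succ']
    ]
    exact strip_null_pad (E v1) (padE v1 + 1) hEchar
  · have h0 : v1 = [] := List.eq_nil_iff_length_eq_zero.mpr (by omega)
    rw [if_neg (by omega)]
    rw [h0]
    norm_num
    have := strip_null_pad [] 1 (by simp)
    simpa [E, List.replicate] using this

-- ===== VERDICT (by name: the statement is the Claim_ definition above) =====
theorem encrypt_key_spec : Claim_equal_encrypt_key := by
  intro s hdom
  unfold Spec_encrypt_key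
  have hb : ∀ b ∈ pvBytes s, b < 256 := by
    intro b hbmem
    simp only [pvBytes, List.mem_map] at hbmem
    obtain ⟨c, hc, rfl⟩ := hbmem
    have := List.all_eq_true.mp hdom c hc
    simp [pvDomChar] at this
    omega
  rw [A_eq_E s hb, alt_eq_E s]
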